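-- pv_equiv track=rewrite | github.com/ps-nithin/pyrebel_old | sample.py | get_pixels_from
-- ===== SOURCE A (Python) =====
-- def next_i(i,pixels):
--     if(i==len(pixels)-1):
--         return 0
--     else: return i+1
--
-- def get_pixels_from(s,e,blob):
--     pixels=list()
--     while 1:
--         pixels.append(blob[s])
--         s=next_i(s,blob)
--         if s==e:
--             pixels.append(blob[s])
--             break
--     return pixels
-- ===== SOURCE B (Python) =====
-- def get_pixels_from(s, e, blob):
--     n = len(blob)
--     first = blob[s]
--     steps = (e - s) % n or n
--     return [first] + [blob[(s + k) % n] for k in range(1, steps + 1)]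
-- ===== Notes on version B (the rewrite author's own statement) =====
-- stated objective: simpler
-- what changed: A walks the circular buffer one index at a time with a next_i helper inside a while-True loop, testing for the end index after each step; B computes the number of steps in closed form ((e-s) mod n, a full circle n when that is 0) and emits the start pixel plus a single comprehension over modular indices, dropping the helper and the loop entirely.
-- intended difference: When the start index is negative and e - s > n, A compares raw indices instead of positions and so walks an extra full lap before stopping (returning e-s+1 pixels); B returns the direct circular path between the two positions ((e-s) mod n + 1 pixels), which is the intended pixel path. — e.g. on get_pixels_from(-3, 1, [1, 2, 3]): A returns [1, 2, 3, 1, 2], B returns [1, 2]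
import Mathlib
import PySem

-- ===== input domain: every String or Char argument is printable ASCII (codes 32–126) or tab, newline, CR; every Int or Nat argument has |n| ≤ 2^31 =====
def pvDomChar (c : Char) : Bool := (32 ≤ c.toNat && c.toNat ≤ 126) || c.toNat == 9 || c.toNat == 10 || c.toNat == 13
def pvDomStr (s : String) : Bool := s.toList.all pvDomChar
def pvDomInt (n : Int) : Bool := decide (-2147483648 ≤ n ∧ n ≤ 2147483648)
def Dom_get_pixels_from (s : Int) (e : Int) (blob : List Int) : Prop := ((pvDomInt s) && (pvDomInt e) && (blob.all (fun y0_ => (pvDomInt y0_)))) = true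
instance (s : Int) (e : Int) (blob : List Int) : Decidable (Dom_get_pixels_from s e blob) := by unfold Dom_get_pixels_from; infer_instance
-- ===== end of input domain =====

-- B replaces A's one-index-at-a-time while-True walk (with the next_i helper and
-- an equality test each step) by a closed-form step count and a single
-- comprehension over modular indices (objective: simpler); on a negative start
-- with e - s > len(blob) the two values differ, see D_ below.

-- ===== PORT A =====
-- next_i(i, pixels)
def pvNextI (i : Int) (pixels : List Int) : Int :=
  if i = (pixels.length : Int) - 1 then 0 else i + 1

-- A's 'while 1' loop; fuel only makes it total in Lean (Pre_ excludes the
-- diverging inputs, and inside Pre_ the fuel given below is never exhausted).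
def pvLoopA (fuel : Nat) (s e : Int) (blob : List Int) (pixels : List Int) : List Int :=
  match fuel with
  | 0 => pixels
  | f + 1 =>
    match PySem.List.pyGet? blob s with
    | none => pixels            -- Python raises IndexError here (outside Pre_)
    | some v =>
      let pixels' := pixels ++ [v]
      let s' := pvNextI s blob
      if s' = e then
        match PySem.List.pyGet? blob s' with
        | none => pixels'
        | some w => pixels' ++ [w]
      else pvLoopA f s' e blob pixels'

def get_pixels_from (s : Int) (e : Int) (blob : List Int) : List Int :=
  pvLoopA (2 * blob.length + 2) s e blob []

-- ===== PORT B =====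
def get_pixels_from_alt (s : Int) (e : Int) (blob : List Int) : List Int :=
  let n : Int := blob.length
  match PySem.List.pyGet? blob s with    -- first = blob[s]; none = IndexError (outside Pre_)
  | none => []
  | some first =>
    let steps : Int := if PySem.Int.mod (e - s) n = 0 then n
                       else PySem.Int.mod (e - s) n   -- Python's '(e - s) % n or n'
    first :: (PySem.List.pyRange 1 (steps + 1) 1).map
      (fun k => PySem.List.pyGetD blob (PySem.Int.mod (s + k) n) 0)
      -- pyGetD is exact here: for n > 0 the index (s+k) mod n lies in [0, n)

-- ===== PRECONDITION & SPEC =====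
-- Exactly the inputs on which the Python A returns: elsewhere A raises
-- IndexError (start index out of range, or empty blob) or loops forever
-- (the walk never meets e).
def Pre_get_pixels_from (s : Int) (e : Int) (blob : List Int) : Prop :=
  blob ≠ [] ∧ -(blob.length : Int) ≤ s ∧ s < (blob.length : Int) ∧
    ((0 ≤ e ∧ e < (blob.length : Int)) ∨ (s < e ∧ e < 0))
instance (s : Int) (e : Int) (blob : List Int) : Decidable (Pre_get_pixels_from s e blob) := by
  unfold Pre_get_pixels_from; infer_instance

def pvWitness_get_pixels_from : Int × Int × List Int := (3, 8, [5, 7, 9, 2, 4, 6, 1, 3, 8, 0, 9, 5])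

-- When the start index is negative and e - s > n, A compares raw indices instead
-- of positions and so walks an extra full lap before stopping (returning e-s+1
-- pixels); B returns the direct circular path between the two positions
-- ((e-s) mod n + 1 pixels), which is the intended pixel path.
def D_get_pixels_from (s : Int) (e : Int) (blob : List Int) : Prop :=
  s < 0 ∧ 0 ≤ e ∧ (blob.length : Int) < e - s
instance (s : Int) (e : Int) (blob : List Int) : Decidable (D_get_pixels_from s e blob) := by
  unfold D_get_pixels_from; infer_instance

def Spec_get_pixels_from (s : Int) (e : Int) (blob : List Int) (out : List Int) : Prop := ¬ D_get_pixels_from s e blob → out = get_pixels_from_alt s e blob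
instance (s : Int) (e : Int) (blob : List Int) (out : List Int) : Decidable (Spec_get_pixels_from s e blob out) := by unfold Spec_get_pixels_from; infer_instance

def pvDiffWitness_get_pixels_from : Int × Int × List Int := (-3, 1, [1, 2, 3])
def pvDiffWitnessOut_get_pixels_from : (List Int) × (List Int) := ([1, 2, 3, 1, 2], [1, 2])

-- ===== CLAIM (what is proved, stated in full; the proofs are below) =====
def Claim_unchanged_get_pixels_from : Prop := ∀ (s : Int) (e : Int) (blob : List Int), Dom_get_pixels_from s e blob → Pre_get_pixels_from s e blob → Spec_get_pixels_from s e blob (get_pixels_from s e blob)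
def Claim_changed_get_pixels_from : Prop := Dom_get_pixels_from (pvDiffWitness_get_pixels_from.1) (pvDiffWitness_get_pixels_from.2.1) (pvDiffWitness_get_pixels_from.2.2) ∧ Pre_get_pixels_from (pvDiffWitness_get_pixels_from.1) (pvDiffWitness_get_pixels_from.2.1) (pvDiffWitness_get_pixels_from.2.2) ∧ D_get_pixels_from (pvDiffWitness_get_pixels_from.1) (pvDiffWitness_get_pixels_from.2.1) (pvDiffWitness_get_pixels_from.2.2) ∧ get_pixels_from (pvDiffWitness_get_pixels_from.1) (pvDiffWitness_get_pixels_from.2.1) (pvDiffWitness_get_pixels_from.2.2) = pvDiffWitnessOut_get_pixels_from.1 ∧ get_pixels_from_alt (pvDiffWitness_get_pixels_from.1) (pvDiffWitness_get_pixels_from.2.1) (pvDiffWitness_get_pixels_from.2.2) = pvDiffWitnessOut_get_pixels_from.2 ∧ pvDiffWitnessOut_get_pixels_from.1 ≠ pvDiffWitnessOut_get_pixels_from.2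
def Claim_exact_get_pixels_from : Prop := ∀ (s : Int) (e : Int) (blob : List Int), Dom_get_pixels_from s e blob → Pre_get_pixels_from s e blob → D_get_pixels_from s e blob → get_pixels_from s e blob ≠ get_pixels_from_alt s e blob

-- ===== LEMMAS AND PROOFS =====

-- The number of loop steps A takes (used with n > 0, inside Pre_).
def pvT (n e s : Int) : Int :=
  if s < 0 then e - s else if (e - s) % n = 0 then n else (e - s) % n

-- the value list [blob[(s+k) % n] for k in range(t+1)]
def pvPath (blob : List Int) (s t : Int) : List Int :=
  (PySem.List.pyRange 0 (t + 1) 1).map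
    (fun k => PySem.List.pyGetD blob ((s + k) % (blob.length : Int)) 0)

lemma pv_emod_small (n a : Int) (h1 : -n ≤ a) (h2 : a < n) :
    a % n = if a < 0 then a + n else a := by
  split_ifs with h
  · have hh := Int.add_mul_emod_self_left (a := a) (b := n) (c := 1)
    rw [mul_one] at hh
    rw [← hh]
    exact Int.emod_eq_of_lt (by omega) (by omega)
  · exact Int.emod_eq_of_lt (by omega) h2

-- one arithmetic step of A's walk, expressed on pvT
lemma pvT_step (n e s : Int) (hn : 0 < n) (hen : e < n) (hel : -n < e)
    (h1 : -n ≤ s) (h2 : s < n) (h3 : e < 0 → s < e) :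
    (1 ≤ pvT n e s) ∧
    ((if s = n - 1 then 0 else s + 1) = e ↔ pvT n e s = 1) ∧
    ((if s = n - 1 then 0 else s + 1) ≠ e →
      (pvT n e (if s = n - 1 then 0 else s + 1) = pvT n e s - 1 ∧
        -n ≤ (if s = n - 1 then 0 else s + 1) ∧ (if s = n - 1 then 0 else s + 1) < n ∧
        (e < 0 → (if s = n - 1 then 0 else s + 1) < e))) := by
  rcases lt_or_ge e 0 with he | he
  · have hse := h3 he
    simp only [pvT]
    split_ifs <;> omega
  · rcases lt_or_ge s 0 with hneg | hpos
    · by_cases hne1 : s + 1 < 0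
      · simp only [pvT]
        split_ifs <;> omega
      · have hs1 : s = -1 := by omega
        subst hs1
        have hnn : ¬ ((-1 : Int) = n - 1) := by omega
        have hm : (e - (-1 + 1)) % n = e - (-1 + 1) := by
          rw [pv_emod_small n _ (by omega) (by omega)]
          split_ifs <;> omega
        simp only [pvT, if_neg hnn, hm]
        split_ifs <;> omega
    · by_cases hs : s = n - 1
      · subst hs
        have hm : (e - (n - 1)) % n = if e - (n - 1) < 0 then e - (n - 1) + n else e - (n - 1) :=
          pv_emod_small n _ (by omega) (by omega)
        have hm2 : (e - 0) % n = e - 0 :=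
          Int.emod_eq_of_lt (by omega) (by omega)
        simp only [pvT, hm, hm2]
        split_ifs <;> omega
      · have hm : (e - s) % n = if e - s < 0 then e - s + n else e - s :=
          pv_emod_small n _ (by omega) (by omega)
        have hm2 : (e - (s + 1)) % n = if e - (s + 1) < 0 then e - (s + 1) + n else e - (s + 1) :=
          pv_emod_small n _ (by omega) (by omega)
        simp only [pvT, if_neg hs, hm, hm2]
        split_ifs <;> omega

lemma pv_get_some (blob : List Int) (s : Int) (hn : 0 < (blob.length : Int))
    (h1 : -(blob.length : Int) ≤ s) (h2 : s < (blob.length : Int)) :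
    PySem.List.pyGet? blob s =
      some (PySem.List.pyGetD blob (s % (blob.length : Int)) 0) := by
  simp only [PySem.List.pyGet?, PySem.List.pyGetD, PySem.List.pyIdx?]
  rcases lt_or_ge s 0 with h | h
  · have hmod : s % (blob.length : Int) = s + blob.length := by
      have hh := Int.add_mul_emod_self_left (a := s) (b := (blob.length : Int)) (c := 1)
      rw [mul_one] at hh
      rw [← hh]; exact Int.emod_eq_of_lt (by omega) (by omega)
    rw [hmod]
    have hx : ¬ (0 ≤ s) := by omega
    have hy : (0:Int) ≤ s + blob.length := by omega
    have hz : s + (blob.length:Int) < blob.length := by omega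
    simp only [hx, if_false, if_pos h1, if_pos hy, if_pos hz]
    simp only [Option.bind]
    have hk : blob.length - (-s).toNat = (s + (blob.length:Int)).toNat := by omega
    rw [hk]
    have hlt : (s + (blob.length:Int)).toNat < blob.length := by omega
    simp [List.getElem?_eq_getElem hlt]
  · have hmod : s % (blob.length : Int) = s := Int.emod_eq_of_lt h h2
    rw [hmod]
    simp only [if_pos h, if_pos h2]
    simp only [Option.bind]
    have hlt : s.toNat < blob.length := by omega
    simp [List.getElem?_eq_getElem hlt]

lemma pvPath_cons (blob : List Int) (s t : Int) (ht : 1 ≤ t) :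
    pvPath blob s t =
      PySem.List.pyGetD blob (s % (blob.length : Int)) 0 :: pvPath blob (s + 1) (t - 1) := by
  unfold pvPath
  rw [PySem.List.pyRange_one_cons (by omega : (0:Int) < t + 1)]
  rw [List.map_cons]
  congr 1
  · norm_num
  · rw [PySem.List.pyRange_one, PySem.List.pyRange_one]
    have : (t + 1 - (0 + 1)).toNat = (t - 1 + 1 - 0).toNat := by omega
    rw [this, List.map_map, List.map_map]
    apply List.map_congr_left
    intro k _
    simp [Function.comp]
    ring_nf

lemma pvPath_shift (blob : List Int) (t : Int) :
    pvPath blob (blob.length : Int) t = pvPath blob 0 t := by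
  unfold pvPath
  apply List.map_congr_left
  intro k _
  congr 1
  rw [zero_add, add_comm]
  have hh := Int.add_mul_emod_self_left (a := k) (b := (blob.length : Int)) (c := 1)
  rw [mul_one] at hh
  rw [hh]

lemma pvPath_one (blob : List Int) (s : Int) :
    pvPath blob s 1 =
      [PySem.List.pyGetD blob (s % (blob.length : Int)) 0,
       PySem.List.pyGetD blob ((s + 1) % (blob.length : Int)) 0] := by
  unfold pvPath
  rw [PySem.List.pyRange_one_cons (by omega : (0:Int) < 1 + 1),
      PySem.List.pyRange_one_cons (by omega : (0:Int) + 1 < 1 + 1),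
      PySem.List.pyRange_one_eq_nil (by omega)]
  norm_num

lemma pvPath_length (blob : List Int) (s t : Int) :
    (pvPath blob s t).length = (t + 1 - 0).toNat := by
  unfold pvPath
  rw [List.length_map, PySem.List.length_pyRange_one]

-- A's loop, started anywhere on the walk, appends exactly the modular path of
-- length pvT + 1.
lemma pv_loop_eq (blob : List Int) (e : Int) (hn : 0 < (blob.length : Int))
    (hen : e < (blob.length : Int)) (hel : -(blob.length : Int) < e) :
    ∀ (t : Nat) (s : Int) (fuel : Nat) (pixels : List Int),
      1 ≤ t → t ≤ fuel →
      -(blob.length : Int) ≤ s → s < (blob.length : Int) → (e < 0 → s < e) →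
      (t : Int) = pvT (blob.length : Int) e s →
      pvLoopA fuel s e blob pixels = pixels ++ pvPath blob s t := by
  intro t
  induction t with
  | zero => intro s fuel pixels h; omega
  | succ t ih =>
    intro s fuel pixels _ hfuel hs1 hs2 hs3 hT
    obtain ⟨f, rfl⟩ : ∃ f, fuel = f + 1 := ⟨fuel - 1, by omega⟩
    have hstep := pvT_step (blob.length : Int) e s hn hen hel hs1 hs2 hs3
    obtain ⟨hT1, hTiff, hTrec⟩ := hstep
    have hnext : pvNextI s blob = if s = (blob.length : Int) - 1 then 0 else s + 1 := rfl
    simp only [pvLoopA, pv_get_some blob s hn hs1 hs2, hnext]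
    by_cases heq : (if s = (blob.length : Int) - 1 then 0 else s + 1) = e
    · -- the very next index is e: the loop appends blob[e] and stops (t = 0)
      have ht0 : t = 0 := by
        have := hTiff.mp heq
        omega
      subst ht0
      have hrange : -(blob.length : Int) ≤ (if s = (blob.length : Int) - 1 then 0 else s + 1) ∧
          (if s = (blob.length : Int) - 1 then 0 else s + 1) < (blob.length : Int) := by
        split_ifs <;> omega
      rw [heq] at hrange
      rw [heq, pv_get_some blob e hn hrange.1 hrange.2]
      have hone : ((0 + 1 : Nat) : Int) = 1 := by norm_num
      have hmod : (s + 1) % (blob.length : Int) = e % (blob.length : Int) := by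
        by_cases hsl : s = (blob.length : Int) - 1
        · rw [if_pos hsl] at heq
          subst hsl
          rw [← heq]
          have hh := Int.add_mul_emod_self_left (a := (0:Int)) (b := (blob.length : Int)) (c := 1)
          rw [mul_one] at hh
          rw [← hh]
          ring_nf
        · rw [if_neg hsl] at heq
          rw [heq]
      rw [hone, pvPath_one, hmod]
      simp
    · rw [if_neg heq]
      obtain ⟨hTr, hr1, hr2, hr3⟩ := hTrec heq
      have hT' : (t : Int) = pvT (blob.length : Int) e (if s = (blob.length : Int) - 1 then 0 else s + 1) := by
        push_cast at hT ⊢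
        omega
      have ht1 : 1 ≤ t := by
        by_contra h0
        have : t = 0 := by omega
        subst this
        simp at hT'
        omega
      rw [ih _ f (pixels ++ [PySem.List.pyGetD blob (s % (blob.length:Int)) 0]) ht1 (by omega) hr1 hr2 hr3 hT']
      rw [List.append_assoc]
      congr 1
      have hcons := pvPath_cons blob s ((t:Int) + 1) (by omega)
      have hpp : pvPath blob (if s = (blob.length : Int) - 1 then 0 else s + 1) ((t:Int)) =
          pvPath blob (s + 1) ((t:Int) + 1 - 1) := by
        by_cases hsl : s = (blob.length : Int) - 1
        · rw [if_pos hsl]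
          have : s + 1 = (blob.length : Int) := by omega
          rw [this]
          rw [pvPath_shift]
          norm_num
        · rw [if_neg hsl]
          norm_num
      rw [hpp]
      have : ((t:Int) + 1) = ((t + 1 : Nat) : Int) := by push_cast; ring
      rw [this] at hcons
      rw [hcons]
      simp

-- A's output, as the modular path of length pvT + 1 (inside Pre_).
lemma pvA_eq_path (s e : Int) (blob : List Int) (hPre : Pre_get_pixels_from s e blob) :
    get_pixels_from s e blob = pvPath blob s (pvT (blob.length : Int) e s) := by
  obtain ⟨hne, hs1, hs2, he⟩ := hPre
  have hn : 0 < (blob.length : Int) := by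
    have := List.length_pos_of_ne_nil hne
    omega
  have hen : e < (blob.length : Int) := by rcases he with ⟨_, h⟩ | ⟨_, h⟩ <;> omega
  have hel : -(blob.length : Int) < e := by rcases he with ⟨h, _⟩ | ⟨h, _⟩ <;> omega
  have hs3 : e < 0 → s < e := by rcases he with ⟨h, _⟩ | ⟨h, _⟩ <;> intro h' <;> omega
  have hm1 : 0 ≤ (e - s) % (blob.length : Int) := Int.emod_nonneg _ (by omega)
  have hm2 : (e - s) % (blob.length : Int) < (blob.length : Int) := Int.emod_lt_of_pos _ hn
  have hT1 : 1 ≤ pvT (blob.length : Int) e s := by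
    unfold pvT
    rcases he with ⟨h, _⟩ | ⟨h, _⟩ <;> split_ifs <;> omega
  have hTb : pvT (blob.length : Int) e s ≤ 2 * (blob.length : Int) + 2 := by
    unfold pvT
    split_ifs <;> omega
  unfold get_pixels_from
  have hkey := pv_loop_eq blob e hn hen hel (pvT (blob.length : Int) e s).toNat s
    (2 * blob.length + 2) [] (by omega) (by omega) hs1 hs2 hs3 (by omega)
  rw [hkey, List.nil_append, Int.toNat_of_nonneg (by omega)]

-- B's output, as the modular path of its closed-form step count (inside Pre_).
lemma pvB_eq_path (s e : Int) (blob : List Int) (hn : 0 < (blob.length : Int))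
    (hs1 : -(blob.length : Int) ≤ s) (hs2 : s < (blob.length : Int)) :
    get_pixels_from_alt s e blob =
      pvPath blob s (if (e - s) % (blob.length : Int) = 0 then (blob.length : Int)
                     else (e - s) % (blob.length : Int)) := by
  have hm1 : 0 ≤ (e - s) % (blob.length : Int) := Int.emod_nonneg _ (by omega)
  have hst : 1 ≤ (if (e - s) % (blob.length : Int) = 0 then (blob.length : Int)
                  else (e - s) % (blob.length : Int)) := by split_ifs <;> omega
  unfold get_pixels_from_alt
  simp only [PySem.Int.mod_eq_emod_of_pos hn, pv_get_some blob s hn hs1 hs2]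
  rw [pvPath_cons blob s _ hst]
  congr 1
  unfold pvPath
  rw [PySem.List.pyRange_one, PySem.List.pyRange_one, List.map_map, List.map_map]
  have hnat : ((if (e - s) % (blob.length : Int) = 0 then (blob.length : Int)
      else (e - s) % (blob.length : Int)) + 1 - 1).toNat =
      ((if (e - s) % (blob.length : Int) = 0 then (blob.length : Int)
      else (e - s) % (blob.length : Int)) - 1 + 1 - 0).toNat := by omega
  rw [hnat]
  apply List.map_congr_left
  intro k _
  simp [Function.comp]
  ring_nf

-- ===== VERDICT (by name: the statement is the Claim_ definition above) =====
theorem get_pixels_from_spec : Claim_unchanged_get_pixels_from := by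
  intro s e blob _ hPre hD
  have hPre' := hPre
  obtain ⟨hne, hs1, hs2, he⟩ := hPre'
  have hn : 0 < (blob.length : Int) := by
    have := List.length_pos_of_ne_nil hne
    omega
  have hen : e < (blob.length : Int) := by rcases he with ⟨_, h⟩ | ⟨_, h⟩ <;> omega
  unfold Spec_get_pixels_from at *
  rw [pvA_eq_path s e blob hPre, pvB_eq_path s e blob hn hs1 hs2]
  congr 1
  unfold pvT
  by_cases hs0 : s < 0
  · rw [if_pos hs0]
    have h1 : 1 ≤ e - s := by rcases he with ⟨h, _⟩ | ⟨h, _⟩ <;> omega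
    have h2 : e - s ≤ (blob.length : Int) := by
      unfold D_get_pixels_from at hD
      rcases he with ⟨h, h'⟩ | ⟨h, h'⟩ <;> omega
    by_cases heq : e - s = (blob.length : Int)
    · rw [heq, Int.emod_self, if_pos rfl]
    · have hm : (e - s) % (blob.length : Int) = e - s := by
        rw [pv_emod_small _ _ (by omega) (by omega)]
        split_ifs <;> omega
      rw [hm, if_neg (by omega)]
  · rw [if_neg hs0]

theorem get_pixels_from_changed : Claim_changed_get_pixels_from := by
  unfold Claim_changed_get_pixels_from; decide

theorem get_pixels_from_tight : Claim_exact_get_pixels_from := by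
  intro s e blob _ hPre hD
  obtain ⟨hsn, he0, hlt⟩ := hD
  obtain ⟨hne, hs1, hs2, he⟩ := hPre
  have hn : 0 < (blob.length : Int) := by
    have := List.length_pos_of_ne_nil hne
    omega
  have hen : e < (blob.length : Int) := by rcases he with ⟨_, h⟩ | ⟨_, h⟩ <;> omega
  rw [pvA_eq_path s e blob ⟨hne, hs1, hs2, he⟩, pvB_eq_path s e blob hn hs1 hs2]
  intro hcontra
  have hlenA := pvPath_length blob s (pvT (blob.length : Int) e s)
  have hlenB := pvPath_length blob s
    (if (e - s) % (blob.length : Int) = 0 then (blob.length : Int)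
     else (e - s) % (blob.length : Int))
  rw [hcontra] at hlenA
  rw [hlenA] at hlenB
  have hTval : pvT (blob.length : Int) e s = e - s := by
    unfold pvT
    rw [if_pos hsn]
  have hm : (e - s) % (blob.length : Int) = e - s - (blob.length : Int) := by
    have hh := Int.add_mul_emod_self_left (a := e - s - (blob.length : Int))
      (b := (blob.length : Int)) (c := 1)
    rw [mul_one] at hh
    have : e - s - (blob.length : Int) + (blob.length : Int) = e - s := by ring
    rw [this] at hh
    rw [hh]
    exact Int.emod_eq_of_lt (by omega) (by omega)
  rw [hTval, hm] at hlenB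
  rw [if_neg (by omega)] at hlenB
  omega
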